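-- pv_equiv track=rewrite | github.com/JihoChoi/dynamic-gcn | dynamic-gcn/tools/random_folds.py | count_train_val_test_labels
-- ===== SOURCE A (Python) =====
-- def count_train_val_test_labels(id_label_dict, fold_x_train, fold_x_val, fold_x_test):
--     train_list, val_list, test_list = [], [], []
--     for id in fold_x_train:
--         train_list.append(id_label_dict[id])
--     for id in fold_x_val:
--         val_list.append(id_label_dict[id])
--     for id in fold_x_test:
--         test_list.append(id_label_dict[id])
--     counts = {'train': [], 'validation': [], 'test': []}
--     for label_num in range(4):  # class count
--         counts['train'].append(sum(value == label_num for value in train_list))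
--         counts['validation'].append(sum(value == label_num for value in val_list))
--         counts['test'].append(sum(value == label_num for value in test_list))
--     return counts
-- ===== SOURCE B (Python) =====
-- def count_train_val_test_labels(id_label_dict, fold_x_train, fold_x_val, fold_x_test):
--     counts = {'train': [0, 0, 0, 0], 'validation': [0, 0, 0, 0], 'test': [0, 0, 0, 0]}
--     for split, ids in (('train', fold_x_train), ('validation', fold_x_val), ('test', fold_x_test)):
--         tally = counts[split]
--         for id in ids:
--             label = id_label_dict[id]
--             if label in (0, 1, 2, 3):
--                 tally[label] += 1
--     return counts
-- ===== Notes on version B (the rewrite author's own statement) =====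
-- stated objective: simpler
-- what changed: Replaces A's three label-list-building loops plus a range(4) re-scan of each list with a single tally pass per split that increments a fixed [0,0,0,0] counter vector in place.
import Mathlib
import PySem

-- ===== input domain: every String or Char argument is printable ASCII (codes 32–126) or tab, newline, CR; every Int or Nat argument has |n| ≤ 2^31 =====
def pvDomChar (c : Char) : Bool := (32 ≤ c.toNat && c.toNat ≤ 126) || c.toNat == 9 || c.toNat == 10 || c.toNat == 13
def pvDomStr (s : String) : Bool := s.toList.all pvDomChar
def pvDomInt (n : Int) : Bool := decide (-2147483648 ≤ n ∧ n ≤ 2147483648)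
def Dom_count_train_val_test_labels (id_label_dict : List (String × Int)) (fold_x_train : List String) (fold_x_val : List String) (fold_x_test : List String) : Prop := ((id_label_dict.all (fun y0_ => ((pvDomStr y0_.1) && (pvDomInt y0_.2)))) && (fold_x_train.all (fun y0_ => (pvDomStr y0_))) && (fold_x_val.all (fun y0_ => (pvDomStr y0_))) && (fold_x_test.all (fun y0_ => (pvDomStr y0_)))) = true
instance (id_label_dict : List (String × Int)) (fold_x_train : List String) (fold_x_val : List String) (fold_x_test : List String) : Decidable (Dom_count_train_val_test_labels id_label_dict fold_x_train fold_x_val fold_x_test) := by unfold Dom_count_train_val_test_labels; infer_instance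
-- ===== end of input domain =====

-- ===== PORT A =====
-- B replaces A's three label-list-building loops plus the range(4) re-scan with one
-- in-place tally pass per split (simpler, one pass); equal return value on Pre_.
-- id_label_dict[id] : first-match association-list lookup; junk default 0 only outside Pre_
def pvGetLabel (id_label_dict : List (String × Int)) (id : String) : Int :=
  (PySem.Dict.ofList id_label_dict).getD id 0

-- sum(value == label_num for value in vals)
def pvCountEq : List Int → Int → Int
  | [], _ => 0
  | v :: vs, n => (if v = n then 1 else 0) + pvCountEq vs n

def count_train_val_test_labels (id_label_dict : List (String × Int)) (fold_x_train : List String) (fold_x_val : List String) (fold_x_test : List String) : List (String × List Int) :=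
  let train_list := fold_x_train.map (pvGetLabel id_label_dict)
  let val_list := fold_x_val.map (pvGetLabel id_label_dict)
  let test_list := fold_x_test.map (pvGetLabel id_label_dict)
  -- for label_num in range(4): append the three sums
  let counts_train := (List.range 4).map (fun n => pvCountEq train_list (Int.ofNat n))
  let counts_val := (List.range 4).map (fun n => pvCountEq val_list (Int.ofNat n))
  let counts_test := (List.range 4).map (fun n => pvCountEq test_list (Int.ofNat n))
  [("train", counts_train), ("validation", counts_val), ("test", counts_test)]

-- ===== PORT B =====
-- if label in (0,1,2,3): tally[label] += 1
def pvBump (acc : List Int) (l : Int) : List Int :=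
  if l = 0 ∨ l = 1 ∨ l = 2 ∨ l = 3 then acc.modify l.toNat (· + 1) else acc

def pvTally (id_label_dict : List (String × Int)) (ids : List String) : List Int :=
  ids.foldl (fun acc id => pvBump acc (pvGetLabel id_label_dict id)) [0, 0, 0, 0]

def count_train_val_test_labels_alt (id_label_dict : List (String × Int)) (fold_x_train : List String) (fold_x_val : List String) (fold_x_test : List String) : List (String × List Int) :=
  [("train", pvTally id_label_dict fold_x_train),
   ("validation", pvTally id_label_dict fold_x_val),
   ("test", pvTally id_label_dict fold_x_test)]

-- ===== PRECONDITION & SPEC =====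
-- Pre_ excludes exactly the inputs where some fold id is not a key of id_label_dict:
-- there both Pythons raise KeyError.
def Pre_count_train_val_test_labels (id_label_dict : List (String × Int)) (fold_x_train : List String) (fold_x_val : List String) (fold_x_test : List String) : Prop :=
  ((fold_x_train ++ fold_x_val ++ fold_x_test).all
    (fun id => id_label_dict.any (fun p => p.1 == id))) = true
instance (id_label_dict : List (String × Int)) (fold_x_train : List String) (fold_x_val : List String) (fold_x_test : List String) : Decidable (Pre_count_train_val_test_labels id_label_dict fold_x_train fold_x_val fold_x_test) := by unfold Pre_count_train_val_test_labels; infer_instance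

def pvWitness_count_train_val_test_labels : (List (String × Int)) × List String × List String × List String :=
  ([("a", 0), ("b", 3), ("c", 7)], ["a", "b", "a"], ["c"], [])

def Spec_count_train_val_test_labels (id_label_dict : List (String × Int)) (fold_x_train : List String) (fold_x_val : List String) (fold_x_test : List String) (out : List (String × List Int)) : Prop := out = count_train_val_test_labels_alt id_label_dict fold_x_train fold_x_val fold_x_test
instance (id_label_dict : List (String × Int)) (fold_x_train : List String) (fold_x_val : List String) (fold_x_test : List String) (out : List (String × List Int)) : Decidable (Spec_count_train_val_test_labels id_label_dict fold_x_train fold_x_val fold_x_test out) := by unfold Spec_count_train_val_test_labels; infer_instance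

-- ===== CLAIM (what is proved, stated in full; the proofs are below) =====
def Claim_equal_count_train_val_test_labels : Prop := ∀ (id_label_dict : List (String × Int)) (fold_x_train : List String) (fold_x_val : List String) (fold_x_test : List String), Dom_count_train_val_test_labels id_label_dict fold_x_train fold_x_val fold_x_test → Pre_count_train_val_test_labels id_label_dict fold_x_train fold_x_val fold_x_test → Spec_count_train_val_test_labels id_label_dict fold_x_train fold_x_val fold_x_test (count_train_val_test_labels id_label_dict fold_x_train fold_x_val fold_x_test)

-- ===== LEMMAS AND PROOFS =====
lemma pvTally_go (d : List (String × Int)) : ∀ (ids : List String) (a b c e : Int),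
    List.foldl (fun acc id => pvBump acc (pvGetLabel d id)) [a, b, c, e] ids
      = [a + pvCountEq (ids.map (pvGetLabel d)) 0,
         b + pvCountEq (ids.map (pvGetLabel d)) 1,
         c + pvCountEq (ids.map (pvGetLabel d)) 2,
         e + pvCountEq (ids.map (pvGetLabel d)) 3]
  | [], a, b, c, e => by simp [pvCountEq]
  | id :: ids, a, b, c, e => by
    have hl := pvTally_go d ids
    simp only [List.foldl_cons, List.map_cons, pvCountEq]
    by_cases h0 : pvGetLabel d id = 0
    · have hb : pvBump [a, b, c, e] (pvGetLabel d id) = [a + 1, b, c, e] := by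
        simp [pvBump, h0, List.modify]
      rw [hb, hl]; simp [h0]; omega
    · by_cases h1 : pvGetLabel d id = 1
      · have hb : pvBump [a, b, c, e] (pvGetLabel d id) = [a, b + 1, c, e] := by
          simp [pvBump, h1, List.modify]
        rw [hb, hl]; simp [h1]; omega
      · by_cases h2 : pvGetLabel d id = 2
        · have hb : pvBump [a, b, c, e] (pvGetLabel d id) = [a, b, c + 1, e] := by
            simp [pvBump, h2, List.modify]
          rw [hb, hl]; simp [h2]; omega
        · by_cases h3 : pvGetLabel d id = 3
          · have hb : pvBump [a, b, c, e] (pvGetLabel d id) = [a, b, c, e + 1] := by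
              simp [pvBump, h3, List.modify]
            rw [hb, hl]; simp [h3]; omega
          · have hb : pvBump [a, b, c, e] (pvGetLabel d id) = [a, b, c, e] := by
              simp [pvBump, h0, h1, h2, h3]
            rw [hb, hl]; simp [h0, h1, h2, h3]

lemma pvTally_eq_counts (d : List (String × Int)) (ids : List String) :
    pvTally d ids = (List.range 4).map (fun n => pvCountEq (ids.map (pvGetLabel d)) (Int.ofNat n)) := by
  unfold pvTally
  rw [pvTally_go]
  simp [List.range_succ]

-- ===== VERDICT (by name: the statement is the Claim_ definition above) =====
theorem count_train_val_test_labels_spec : Claim_equal_count_train_val_test_labels := by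
  intro d tr va te _ _
  unfold Spec_count_train_val_test_labels count_train_val_test_labels count_train_val_test_labels_alt
  simp [pvTally_eq_counts]
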